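-- pv_equiv track=rewrite | github.com/yerinsally/TIL | 프로그래머스/0/181928. 이어 붙인 수/이어 붙인 수.py | solution
-- ===== SOURCE A (Python) =====
-- def solution(num_list):
--     answer = 0
--     num1 = 0
--     num2 = 0
--     for num in num_list:
--         if num % 2 == 1:
--             num1 = num1*10 + num
--         else:
--             num2 = num2*10 + num
--     answer = num1 + num2
--     return answer
-- ===== SOURCE B (Python) =====
-- from functools import reduce
--
-- def solution(num_list):
--     odds = [n for n in num_list if n % 2 == 1]
--     evens = [n for n in num_list if n % 2 != 1]
--     fold = lambda xs: reduce(lambda a, b: a * 10 + b, xs, 0)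
--     return fold(odds) + fold(evens)
-- ===== Notes on version B (the rewrite author's own statement) =====
-- stated objective: alternative
-- what changed: Replaces the single loop with two interleaved accumulators by a partition into odds/evens followed by a separate left fold (reduce) over each list.
import Mathlib
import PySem

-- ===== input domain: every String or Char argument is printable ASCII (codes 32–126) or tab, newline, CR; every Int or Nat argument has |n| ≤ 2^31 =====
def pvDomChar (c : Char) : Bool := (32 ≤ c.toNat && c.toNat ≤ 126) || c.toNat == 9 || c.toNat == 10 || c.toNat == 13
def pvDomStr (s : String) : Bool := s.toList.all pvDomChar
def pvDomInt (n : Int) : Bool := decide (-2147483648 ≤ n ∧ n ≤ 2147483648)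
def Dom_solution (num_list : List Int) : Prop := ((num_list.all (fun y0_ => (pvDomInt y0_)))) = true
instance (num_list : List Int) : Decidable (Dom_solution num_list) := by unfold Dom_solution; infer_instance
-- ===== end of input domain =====

-- B partitions into odds/evens and folds each separately; A keeps two accumulators in one loop. Return values proved equal; objective: alternative decomposition.

-- ===== PORT A =====
-- one loop, state (num1, num2), branch on num % 2 == 1 (Python floor mod)
def solution (num_list : List Int) : Int :=
  let st := num_list.foldl
    (fun (p : Int × Int) num =>
      if PySem.Int.mod num 2 = 1 then (p.1 * 10 + num, p.2)
      else (p.1, p.2 * 10 + num))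
    (0, 0)
  st.1 + st.2

-- ===== PORT B =====
def pvFoldNum (xs : List Int) : Int := xs.foldl (fun a b => a * 10 + b) 0

def solution_alt (num_list : List Int) : Int :=
  let odds := num_list.filter (fun n => PySem.Int.mod n 2 = 1)
  let evens := num_list.filter (fun n => PySem.Int.mod n 2 ≠ 1)
  pvFoldNum odds + pvFoldNum evens

-- ===== PRECONDITION & SPEC =====
def Spec_solution (num_list : List Int) (out : Int) : Prop := out = solution_alt num_list
instance (num_list : List Int) (out : Int) : Decidable (Spec_solution num_list out) := by unfold Spec_solution; infer_instance

-- ===== CLAIM (what is proved, stated in full; the proofs are below) =====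
def Claim_equal_solution : Prop := ∀ (num_list : List Int), Dom_solution num_list → Spec_solution num_list (solution num_list)

-- ===== LEMMAS AND PROOFS =====
-- loop invariant: A's pair fold from (a,b) computes the two filtered folds seeded with a and b
theorem pv_loop_inv (l : List Int) (a b : Int) :
    l.foldl
      (fun (p : Int × Int) num =>
        if PySem.Int.mod num 2 = 1 then (p.1 * 10 + num, p.2)
        else (p.1, p.2 * 10 + num)) (a, b)
    = ((l.filter (fun n => PySem.Int.mod n 2 = 1)).foldl (fun x y => x * 10 + y) a,
       (l.filter (fun n => PySem.Int.mod n 2 ≠ 1)).foldl (fun x y => x * 10 + y) b) := by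
  induction l generalizing a b with
  | nil => rfl
  | cons h t ih =>
    by_cases hc : PySem.Int.mod h 2 = 1 <;>
      simp only [List.foldl_cons, List.filter_cons, hc, decide_true, decide_false,
        not_true_eq_false, not_false_eq_true, ih]
    · simp [hc]
    · have h2 : (2:Int) ∣ h := by
        rcases PySem.Int.mod_two_eq h with h' | h'
        · exact (PySem.Int.mod_eq_zero_iff_dvd h 2).mp h'
        · exact absurd h' hc
      simp [hc, h2]

-- ===== VERDICT (by name: the statement is the Claim_ definition above) =====
theorem solution_spec : Claim_equal_solution := by
  intro l _
  unfold Spec_solution solution solution_alt pvFoldNum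
  simp only [pv_loop_inv]
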